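-- pv_equiv track=rewrite | github.com/zouharvi/mff-student | other/lansher/lansher.py | create_tuples
-- ===== SOURCE A (Python) =====
-- def create_tuples(n, words):
--     # create all n-tuple subsequences from list of string
--     tuples = []
--     for element in words:
--         processed = ""
--         cur_length = 0
--         for c in element:
--             processed += c
--             cur_length += 1
--             if cur_length == n:
--                 cur_length -= 1
--                 tuples.append(processed)
--                 processed = processed[1:]
--     return tuples
-- ===== SOURCE B (Python) =====
-- def create_tuples(n, words):
--     # create all n-tuple subsequences from list of string
--     if n < 1:
--         return []
--     return [w[i:i + n] for w in words for i in range(len(w) - n + 1)]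
-- ===== Notes on version B (the rewrite author's own statement) =====
-- stated objective: simpler
-- what changed: Replaces the running-window accumulator (string grown character by character, counted, and rotated with [1:]) by a flat comprehension that slices each word directly at every start index.
import Mathlib
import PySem

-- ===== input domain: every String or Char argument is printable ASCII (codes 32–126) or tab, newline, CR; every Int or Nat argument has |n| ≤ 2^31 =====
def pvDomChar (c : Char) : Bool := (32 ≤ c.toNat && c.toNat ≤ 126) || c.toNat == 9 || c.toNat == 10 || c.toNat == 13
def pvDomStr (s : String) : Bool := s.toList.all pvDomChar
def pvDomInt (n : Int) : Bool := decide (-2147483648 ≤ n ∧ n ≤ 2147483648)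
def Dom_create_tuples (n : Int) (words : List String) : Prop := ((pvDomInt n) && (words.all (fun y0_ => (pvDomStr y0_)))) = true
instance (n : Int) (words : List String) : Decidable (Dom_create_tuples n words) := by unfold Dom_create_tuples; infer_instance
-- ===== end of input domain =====

-- B replaces A's running-window accumulator (a string grown char by char and rotated
-- with [1:]) by direct slicing at every start index — simpler; return values are equal.

-- ===== PORT A =====
-- one step of A's inner 'for c in element' loop; state = (tuples, processed, cur_length)
def pvStepA (n : Int) (st : List String × List Char × Int) (c : Char) :
    List String × List Char × Int :=
  let processed := st.2.1 ++ [c]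
  let cur_length := st.2.2 + 1
  if cur_length = n then
    (st.1 ++ [String.ofList processed], PySem.List.slice processed (some 1) none, cur_length - 1)
  else
    (st.1, processed, cur_length)

def create_tuples (n : Int) (words : List String) : List String :=
  words.foldl (fun tuples element =>
    (element.toList.foldl (pvStepA n) (tuples, ([] : List Char), (0 : Int))).1) []

-- ===== PORT B =====
def create_tuples_alt (n : Int) (words : List String) : List String :=
  if n < 1 then []
  else
    words.flatMap (fun w =>
      (PySem.List.pyRange 0 ((w.toList.length : Int) - n + 1) 1).map (fun i =>
        String.ofList (PySem.List.slice w.toList (some i) (some (i + n)))))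

-- ===== PRECONDITION & SPEC =====
def Spec_create_tuples (n : Int) (words : List String) (out : List String) : Prop := out = create_tuples_alt n words
instance (n : Int) (words : List String) (out : List String) : Decidable (Spec_create_tuples n words out) := by unfold Spec_create_tuples; infer_instance

-- ===== CLAIM (what is proved, stated in full; the proofs are below) =====
def Claim_equal_create_tuples : Prop := ∀ (n : Int) (words : List String), Dom_create_tuples n words → Spec_create_tuples n words (create_tuples n words)

-- ===== LEMMAS AND PROOFS =====

-- all length-N contiguous windows of a character list, in start-index order
def pvWins (N : Nat) : List Char → List (List Char)
  | [] => []
  | c :: cs => if N ≤ cs.length + 1 then (c :: cs).take N :: pvWins N cs else []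

theorem pvWins_eq_nil_of_lt (N : Nat) (l : List Char) (h : l.length < N) :
    pvWins N l = [] := by
  cases l with
  | nil => rfl
  | cons c cs => simp only [pvWins]; rw [if_neg]; simp at h; omega

theorem pvWins_cons_of_le (N : Nat) (l : List Char) (hN : 1 ≤ N) (h : N ≤ l.length) :
    pvWins N l = l.take N :: pvWins N l.tail := by
  cases l with
  | nil => simp at h; omega
  | cons c cs => simp only [pvWins, List.length_cons] at h ⊢; rw [if_pos h]; rfl

-- B's slice comprehension over start indices produces exactly the windows
theorem pvAltWord (N : Nat) (hN : 1 ≤ N) (l : List Char) :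
    (PySem.List.pyRange 0 ((l.length : Int) - (N : Int) + 1) 1).map (fun i =>
      PySem.List.slice l (some i) (some (i + (N : Int)))) = pvWins N l := by
  induction l with
  | nil =>
    rw [pvWins_eq_nil_of_lt N [] (by simp only [List.length_nil]; omega)]
    rw [PySem.List.pyRange_one]
    simp
    all_goals omega
  | cons c cs ih =>
    by_cases h : N ≤ cs.length + 1
    · rw [pvWins_cons_of_le N (c :: cs) hN (by simpa using h)]
      have hb : (0 : Int) < ((c :: cs).length : Int) - (N : Int) + 1 := by
        simp only [List.length_cons]; push_cast; omega
      rw [PySem.List.pyRange_one_cons hb]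
      simp only [List.map_cons]
      congr 1
      · -- head: slice from 0 is take N
        rw [PySem.List.slice_zero_start]
        have : (0 : Int) + (N : Int) = ((N : Nat) : Int) := by simp
        rw [this, PySem.List.slice_to_natCast]
      · -- tail: shift indices by one and use the IH on cs
        simp only [List.tail_cons]
        rw [← ih]
        rw [PySem.List.pyRange_one, PySem.List.pyRange_one]
        have hlen : (((c :: cs).length : Int) - (N : Int) + 1 - (0 + 1)).toNat
            = ((cs.length : Int) - (N : Int) + 1 - 0).toNat := by
          simp only [List.length_cons]; push_cast; omega
        rw [List.map_map, List.map_map, hlen]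
        apply List.map_congr_left
        intro k _
        simp only [Function.comp_apply]
        have h1 : (0 : Int) + 1 + (k : Int) = ((k + 1 : Nat) : Int) := by push_cast; ring
        have h2 : (0 : Int) + (k : Int) = ((k : Nat) : Int) := by simp
        rw [h1, h2]
        have e1 : ((k + 1 : Nat) : Int) + (N : Int) = (((k + 1) + N : Nat) : Int) := by push_cast; ring
        have e2 : ((k : Nat) : Int) + (N : Int) = ((k + N : Nat) : Int) := by push_cast; ring
        rw [e1, e2, PySem.List.slice_natCast, PySem.List.slice_natCast]
        have : (k + 1 + N) - (k + 1) = (k + N) - k := by omega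
        rw [this]
        simp [List.drop_succ_cons]
    · rw [pvWins_eq_nil_of_lt N (c :: cs) (by simp; omega)]
      rw [PySem.List.pyRange_one]
      simp
      all_goals omega

-- A's inner loop, for n ≥ 1: from a partial window p it appends the windows of p ++ cs
theorem pvInnerA (N : Nat) (hN : 1 ≤ N) (cs : List Char) :
    ∀ (p : List Char) (acc : List String), p.length < N →
      (cs.foldl (pvStepA (N : Int)) (acc, p, (p.length : Int))).1
        = acc ++ (pvWins N (p ++ cs)).map String.ofList := by
  induction cs with
  | nil =>
    intro p acc hp
    simp [pvWins_eq_nil_of_lt N p (by simpa using hp)]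
  | cons c cs ih =>
    intro p acc hp
    simp only [List.foldl_cons]
    by_cases hc : p.length + 1 = N
    · have hcond : ((p.length : Int) + 1 = (N : Int)) := by omega
      have hstep : pvStepA (N : Int) (acc, p, (p.length : Int)) c
          = (acc ++ [String.ofList (p ++ [c])], (p ++ [c]).tail, ((p ++ [c]).tail.length : Int)) := by
        simp only [pvStepA, if_pos hcond, PySem.List.slice_from_one]
        simp
      rw [hstep, ih (p ++ [c]).tail (acc ++ [String.ofList (p ++ [c])]) (by simp; omega)]
      have hw : pvWins N (p ++ c :: cs) = (p ++ [c]) :: pvWins N ((p ++ [c]).tail ++ cs) := by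
        have h1 : p ++ c :: cs = (p ++ [c]) ++ cs := by simp
        rw [h1, pvWins_cons_of_le N ((p ++ [c]) ++ cs) hN (by simp; omega)]
        congr 1
        · rw [List.take_append_of_le_length (by simp; omega)]
          rw [List.take_of_length_le (by simp; omega)]
        · congr 1
          rw [List.tail_append_of_ne_nil (by simp)]
      rw [hw]
      simp
    · have hcond : ¬ ((p.length : Int) + 1 = (N : Int)) := by omega
      have hstep : pvStepA (N : Int) (acc, p, (p.length : Int)) c
          = (acc, p ++ [c], ((p ++ [c]).length : Int)) := by
        simp only [pvStepA, if_neg hcond]; simp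
      rw [hstep, ih (p ++ [c]) acc (by simp; omega)]
      simp

-- for n < 1 the inner loop never appends anything
theorem pvInnerA_neg (n : Int) (hn : n < 1) (cs : List Char) :
    ∀ (acc : List String) (p : List Char) (k : Int), 0 ≤ k →
      (cs.foldl (pvStepA n) (acc, p, k)).1 = acc := by
  induction cs with
  | nil => intro acc p k _; rfl
  | cons c cs ih =>
    intro acc p k hk
    simp only [List.foldl_cons]
    have hstep : pvStepA n (acc, p, k) c = (acc, p ++ [c], k + 1) := by
      simp only [pvStepA, if_neg (by omega : ¬ k + 1 = n)]
    rw [hstep]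
    exact ih acc (p ++ [c]) (k + 1) (by omega)

-- ===== VERDICT (by name: the statement is the Claim_ definition above) =====
theorem create_tuples_spec : Claim_equal_create_tuples := by
  intro n words _
  unfold Spec_create_tuples create_tuples create_tuples_alt
  by_cases hn : n < 1
  · rw [if_pos hn]
    have hcongr : ∀ (acc : List String) (w : String), w ∈ words →
        (w.toList.foldl (pvStepA n) (acc, ([] : List Char), (0 : Int))).1 = acc := by
      intro acc w _; exact pvInnerA_neg n hn w.toList acc [] 0 le_rfl
    rw [PySem.List.foldl_congr_mem words _ (fun tuples _ => tuples) [] hcongr]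
    exact PySem.List.foldl_ignore words []
  · rw [if_neg hn]
    have hN : 1 ≤ n.toNat := by omega
    have hcast : ((n.toNat : Nat) : Int) = n := by omega
    have hcongr : ∀ (acc : List String) (w : String), w ∈ words →
        (w.toList.foldl (pvStepA n) (acc, ([] : List Char), (0 : Int))).1
          = acc ++ (pvWins n.toNat w.toList).map String.ofList := by
      intro acc w _
      have h := pvInnerA n.toNat hN w.toList [] acc (by simp only [List.length_nil]; omega)
      rw [hcast] at h
      simpa using h
    rw [PySem.List.foldl_congr_mem words _
      (fun tuples w => tuples ++ (pvWins n.toNat w.toList).map String.ofList) [] hcongr]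
    rw [PySem.List.foldl_append_eq_flatMap]
    simp only [List.nil_append]
    apply List.flatMap_congr  -- pointwise equality of the per-word lists
    intro w _
    have hw := pvAltWord n.toNat hN w.toList
    rw [hcast] at hw
    rw [← hw, List.map_map]
    rfl
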